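-- pv_equiv track=rewrite | github.com/morino-kumasan/comfyui-utils | toml_prompt/toml_prompt_decode.py | build_search_keys
-- ===== SOURCE A (Python) =====
-- import functools
--
-- def build_search_keys(keys, prefix=[]):
--     if isinstance(keys, str):
--         keys = [(key.split("+")) for key in keys.split(".")]
--     key_len = len(keys)
--     if key_len == 1:
--         return [".".join(prefix + [key]) for key in keys[0]]
--     elif key_len == 0:
--         return []
--     return functools.reduce(lambda x, y: x + y, [[".".join(prefix + [key])] + build_search_keys(keys[1:], prefix + [key]) for key in keys[0]])
-- ===== SOURCE B (Python) =====
-- def build_search_keys(keys, prefix=[]):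
--     if isinstance(keys, str):
--         keys = [key.split("+") for key in keys.split(".")]
--     if not keys:
--         return []
--     out = []
--     stack = [(prefix + [k], 0) for k in reversed(keys[0])]
--     while stack:
--         path, d = stack.pop()
--         out.append(".".join(path))
--         if d + 1 < len(keys):
--             stack.extend((path + [k], d + 1) for k in reversed(keys[d + 1]))
--     return out
-- ===== Notes on version B (the rewrite author's own statement) =====
-- stated objective: alternative
-- what changed: Replaces A's functools.reduce recursion (which rebuilds and concatenates sublists at every level) with an iterative preorder DFS over an explicit stack of (path, depth) pairs, appending each joined path to a single output list.
import Mathlib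
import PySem

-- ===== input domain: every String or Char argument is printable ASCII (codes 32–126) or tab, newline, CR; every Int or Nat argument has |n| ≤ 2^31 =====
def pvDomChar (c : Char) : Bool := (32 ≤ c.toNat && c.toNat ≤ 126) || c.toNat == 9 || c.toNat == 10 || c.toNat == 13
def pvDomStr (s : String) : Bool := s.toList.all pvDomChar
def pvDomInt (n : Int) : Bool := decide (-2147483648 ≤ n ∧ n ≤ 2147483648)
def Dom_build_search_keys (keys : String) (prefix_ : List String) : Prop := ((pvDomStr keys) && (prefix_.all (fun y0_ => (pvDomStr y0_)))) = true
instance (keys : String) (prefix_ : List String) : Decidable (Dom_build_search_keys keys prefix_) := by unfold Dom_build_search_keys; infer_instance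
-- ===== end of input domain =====

-- B replaces A's functools.reduce recursion with an iterative explicit-stack preorder DFS (alternative decomposition, same cost).

-- The isinstance(keys, str) parse shared verbatim by both Pythons: keys.split(".") then key.split("+").
-- str.split with a non-empty literal separator never fails, so split? is always `some`; getD [] is never taken.
def bskParse (keys : String) : List (List String) :=
  ((PySem.Str.split? keys ".").getD []).map (fun key => (PySem.Str.split? key "+").getD [])

-- ===== PORT A =====
-- Recursive body of A after the parse: branches in A's order (len==1, len==0, else reduce).
def buildSearchKeysA : List (List String) → List String → List String
  | [l0], prefix_ => l0.map (fun key => PySem.Str.join "." (prefix_ ++ [key]))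
  | [], _ => []
  | l0 :: rest, prefix_ =>
      -- the comprehension handed to functools.reduce(lambda x, y: x + y, …)
      let parts := l0.map (fun key => (PySem.Str.join "." (prefix_ ++ [key])) :: buildSearchKeysA rest (prefix_ ++ [key]))
      -- reduce over an empty iterable would raise TypeError in Python; unreachable here, since
      -- every level comes from str.split, which never returns an empty list
      match parts with
      | [] => []
      | x :: xs => xs.foldl (· ++ ·) x

def build_search_keys (keys : String) (prefix_ : List String) : List String :=
  buildSearchKeysA (bskParse keys) prefix_

-- ===== PORT B =====
-- Subtree weight, used only as the termination measure of the DFS loop.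
def bskWeight (levels : List (List String)) (d : Nat) : Nat :=
  if _h : d + 1 < levels.length then 1 + (levels.getD (d+1) []).length * bskWeight levels (d+1) else 1
  termination_by levels.length - d

-- The while loop. Python's list stack pops from the end and extends with reversed(children);
-- on a head-is-top Lean list that is popping the head and prepending the children in order.
-- out.append(…) happens before the branch, hence `out ++ […]` in both arms.
def bskLoop (levels : List (List String)) : List (List String × Nat) → List String → List String
  | [], out => out
  | (path, d) :: stack', out =>
      if _h : d + 1 < levels.length then
        bskLoop levels (((levels.getD (d+1) []).map (fun k => (path ++ [k], d+1))) ++ stack')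
          (out ++ [PySem.Str.join "." path])
      else
        bskLoop levels stack' (out ++ [PySem.Str.join "." path])
  termination_by stack => (stack.map (fun pd => bskWeight levels pd.2)).sum
  decreasing_by
  · simp only [List.map_cons, List.sum_cons, List.map_append, List.sum_append, List.map_map]
    have h1 : ((levels.getD (d+1) []).map ((fun pd => bskWeight levels pd.2) ∘ (fun k => (path ++ [k], d+1)))).sum
        = (levels.getD (d+1) []).length * bskWeight levels (d+1) := by
      induction (levels.getD (d+1) []) with
      | nil => simp
      | cons a l ih => simp [ih, Nat.succ_mul, Nat.add_comm]
    have h2 : bskWeight levels d = 1 + (levels.getD (d+1) []).length * bskWeight levels (d+1) := by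
      rw [bskWeight]; simp [_h]
    omega
  · simp only [List.map_cons, List.sum_cons]
    have h2 : 1 ≤ bskWeight levels d := by
      rw [bskWeight]; split <;> omega
    omega

-- B's body after the parse: the `if not keys` guard, the seeded stack, then the loop.
def bskEntry (levels : List (List String)) (prefix_ : List String) : List String :=
  match levels with
  | [] => []
  | l0 :: _ => bskLoop levels (l0.map (fun k => (prefix_ ++ [k], 0))) []

def build_search_keys_alt (keys : String) (prefix_ : List String) : List String :=
  bskEntry (bskParse keys) prefix_

-- ===== PRECONDITION & SPEC =====
def Spec_build_search_keys (keys : String) (prefix_ : List String) (out : List String) : Prop := out = build_search_keys_alt keys prefix_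
instance (keys : String) (prefix_ : List String) (out : List String) : Decidable (Spec_build_search_keys keys prefix_ out) := by unfold Spec_build_search_keys; infer_instance

-- ===== CLAIM (what is proved, stated in full; the proofs are below) =====
def Claim_equal_build_search_keys : Prop := ∀ (keys : String) (prefix_ : List String), Dom_build_search_keys keys prefix_ → Spec_build_search_keys keys prefix_ (build_search_keys keys prefix_)

-- ===== LEMMAS AND PROOFS =====

-- Reference function: preorder listing of the subtree rooted at `path` with remaining levels `rest`.
def bskSub : List (List String) → List String → List String
  | [], path => [PySem.Str.join "." path]
  | l :: rest, path => PySem.Str.join "." path :: l.flatMap (fun k => bskSub rest (path ++ [k]))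

theorem foldl_append_flatten (x : List String) (xs : List (List String)) :
    xs.foldl (· ++ ·) x = x ++ xs.flatten := by
  induction xs generalizing x with
  | nil => simp
  | cons a l ih => simp [List.foldl_cons, ih]

theorem buildA_eq_sub (l0 : List String) (rest : List (List String)) (prefix_ : List String) :
    buildSearchKeysA (l0 :: rest) prefix_ = l0.flatMap (fun k => bskSub rest (prefix_ ++ [k])) := by
  induction rest generalizing l0 prefix_ with
  | nil =>
      simp only [buildSearchKeysA, bskSub]
      induction l0 with
      | nil => simp
      | cons a t iht => simp_all
  | cons r1 rest' ih =>
      rw [buildSearchKeysA]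
      · cases l0 with
        | nil => simp
        | cons k ks =>
            simp only [List.map_cons]
            rw [foldl_append_flatten, ← List.flatMap_def]
            simp [ih, bskSub]
      · simp

-- B's loop computes the concatenation of the subtrees of the stack entries, appended to `out`.
theorem bskLoop_eq (levels : List (List String)) (stack : List (List String × Nat)) (out : List String) :
    bskLoop levels stack out = out ++ stack.flatMap (fun pd => bskSub (levels.drop (pd.2 + 1)) pd.1) := by
  induction stack, out using bskLoop.induct levels with
  | case1 out => simp [bskLoop]
  | case2 path d stack' out h ih =>
      rw [bskLoop]
      simp only [h, dite_true]
      rw [ih]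
      have hdrop : levels.drop (d+1) = levels[d+1] :: levels.drop (d+2) :=
        List.drop_eq_getElem_cons h
      have hget : levels.getD (d+1) [] = levels[d+1] := List.getD_eq_getElem levels [] h
      simp only [List.flatMap_cons, List.flatMap_append, hdrop, bskSub, hget, List.flatMap_map]
      simp
  | case3 path d stack' out h ih =>
      rw [bskLoop]
      simp only [h, dite_false]
      rw [ih]
      have hdrop : levels.drop (d+1) = [] := by
        apply List.drop_eq_nil_of_le; omega
      simp [hdrop, bskSub]

theorem ports_agree (levels : List (List String)) (prefix_ : List String) :
    buildSearchKeysA levels prefix_ = bskEntry levels prefix_ := by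
  cases levels with
  | nil => simp [buildSearchKeysA, bskEntry]
  | cons l0 rest =>
      rw [bskEntry, buildA_eq_sub, bskLoop_eq]
      simp [List.flatMap_map]

-- ===== VERDICT (by name: the statement is the Claim_ definition above) =====
theorem build_search_keys_spec : Claim_equal_build_search_keys := by
  intro keys prefix_ _
  exact ports_agree (bskParse keys) prefix_
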